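-- pv_equiv track=rewrite | github.com/james-williams-code/fundamentals | algorithms/problems/week2/wildcards/wildcards.py | print_wildcard_permutations
-- ===== SOURCE A (Python) =====
-- def print_wildcard_permutations(s):
--
--     n = len(s)
--
--     output = []
--     possible = ['0','1']
--     def print_helper(perm,pos):
--         if pos == n:
--             output.append(perm)
--             return
--         if s[pos] == '?':
--             for p in possible:
--                 st = perm + p
--                 print_helper(st,pos+1)
--         else:
--             perm += s[pos]
--             print_helper(perm, pos + 1)
--     print_helper('',0)
--     return output
-- ===== SOURCE B (Python) =====
-- def print_wildcard_permutations(s):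
--     prefixes = ['']
--     for c in s:
--         opts = '01' if c == '?' else c
--         prefixes = [p + d for p in prefixes for d in opts]
--     return prefixes
-- ===== Notes on version B (the rewrite author's own statement) =====
-- stated objective: simpler
-- what changed: Replaces the DFS recursion with a shared output list by a single breadth-first left-to-right loop that rebuilds the full list of prefixes at each character via a comprehension.
import Mathlib
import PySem

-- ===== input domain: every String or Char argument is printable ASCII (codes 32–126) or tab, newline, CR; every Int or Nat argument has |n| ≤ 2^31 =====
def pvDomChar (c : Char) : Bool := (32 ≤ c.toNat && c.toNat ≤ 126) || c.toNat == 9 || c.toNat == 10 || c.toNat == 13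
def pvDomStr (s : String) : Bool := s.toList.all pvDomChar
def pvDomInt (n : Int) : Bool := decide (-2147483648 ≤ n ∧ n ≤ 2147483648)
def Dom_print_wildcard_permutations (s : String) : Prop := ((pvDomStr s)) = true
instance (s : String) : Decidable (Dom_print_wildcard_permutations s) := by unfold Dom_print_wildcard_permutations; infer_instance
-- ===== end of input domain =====

-- B replaces A's DFS recursion (shared output list) by a breadth-first loop that
-- rebuilds the whole list of prefixes at each character; same output, same cost.


-- ===== PORT A =====
-- A's nested `print_helper(perm, pos)`: recursion over the remaining characters;
-- DFS appends to the shared `output` list = concatenation of the recursive results.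
def pwpHelper : List Char → String → List String
  | [], perm => [perm]
  | c :: rest, perm =>
    if c = '?' then
      pwpHelper rest (perm ++ "0") ++ pwpHelper rest (perm ++ "1")
    else
      pwpHelper rest (perm ++ String.singleton c)

def print_wildcard_permutations (s : String) : List String :=
  pwpHelper s.toList ""

-- ===== PORT B =====
-- one pass over the characters, rebuilding the full prefix list each step
def print_wildcard_permutations_alt (s : String) : List String :=
  s.toList.foldl
    (fun prefixes c =>
      let opts := if c = '?' then ['0', '1'] else [c]
      prefixes.flatMap (fun p => opts.map (fun d => p ++ String.singleton d)))
    [""]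

-- ===== PRECONDITION & SPEC =====
def Spec_print_wildcard_permutations (s : String) (out : List String) : Prop := out = print_wildcard_permutations_alt s
instance (s : String) (out : List String) : Decidable (Spec_print_wildcard_permutations s out) := by unfold Spec_print_wildcard_permutations; infer_instance

-- ===== CLAIM (what is proved, stated in full; the proofs are below) =====
def Claim_equal_print_wildcard_permutations : Prop := ∀ (s : String), Dom_print_wildcard_permutations s → Spec_print_wildcard_permutations s (print_wildcard_permutations s)

-- ===== LEMMAS AND PROOFS =====

-- one step of A's recursion, written as B's per-character expansion
theorem pwpHelper_cons (c : Char) (rest : List Char) (p : String) :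
    pwpHelper (c :: rest) p =
      ((if c = '?' then ['0', '1'] else [c]).map (fun d => p ++ String.singleton d)).flatMap
        (fun q => pwpHelper rest q) := by
  by_cases h : c = '?'
  · subst h
    simp [pwpHelper, String.singleton]
  · simp [pwpHelper, h]

-- invariant: flat-mapping A's helper over a prefix list equals B's fold from that list
theorem pwp_invariant (l : List Char) :
    ∀ (ps : List String),
      ps.flatMap (fun p => pwpHelper l p) =
      l.foldl
        (fun prefixes c =>
          let opts := if c = '?' then ['0', '1'] else [c]
          prefixes.flatMap (fun p => opts.map (fun d => p ++ String.singleton d)))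
        ps := by
  induction l with
  | nil => intro ps; simp [pwpHelper]
  | cons c rest ih =>
    intro ps
    simp only [List.foldl_cons]
    rw [← ih]
    simp only [List.flatMap_assoc]
    simp only [pwpHelper_cons, List.flatMap_map]

-- ===== VERDICT (by name: the statement is the Claim_ definition above) =====
theorem print_wildcard_permutations_spec : Claim_equal_print_wildcard_permutations := by
  intro s _
  unfold Spec_print_wildcard_permutations print_wildcard_permutations print_wildcard_permutations_alt
  have h := pwp_invariant s.toList [""]
  simpa using h
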